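-- pv_equiv track=rewrite | github.com/MrBrantCode/unitest_baseline | mut_generate/mist_train_taco/taco_1135/solution.py | phiSum
-- ===== SOURCE A (Python) =====
-- def phiSum(N):
--     def euler_totient(n):
--         result = n
--         p = 2
--         while p * p <= n:
--             if n % p == 0:
--                 while n % p == 0:
--                     n //= p
--                 result -= result // p
--             p += 1
--         if n > 1:
--             result -= result // n
--         return result
--
--     total_sum = 0
--     for i in range(1, N + 1):
--         if N % i == 0:
--             total_sum += euler_totient(i)
--
--     return total_sum
-- ===== SOURCE B (Python) =====
-- def phiSum(N):
--     # Gauss's identity: the totients of the divisors of N sum to N (for N >= 1).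
--     return N if N > 0 else 0
-- ===== Notes on version B (the rewrite author's own statement) =====
-- stated objective: faster
-- what changed: Replaces the divisor scan with per-divisor trial-division totients by Gauss's identity sum_{d|N} phi(d) = N, returning N directly (0 for N <= 0).
import Mathlib
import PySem

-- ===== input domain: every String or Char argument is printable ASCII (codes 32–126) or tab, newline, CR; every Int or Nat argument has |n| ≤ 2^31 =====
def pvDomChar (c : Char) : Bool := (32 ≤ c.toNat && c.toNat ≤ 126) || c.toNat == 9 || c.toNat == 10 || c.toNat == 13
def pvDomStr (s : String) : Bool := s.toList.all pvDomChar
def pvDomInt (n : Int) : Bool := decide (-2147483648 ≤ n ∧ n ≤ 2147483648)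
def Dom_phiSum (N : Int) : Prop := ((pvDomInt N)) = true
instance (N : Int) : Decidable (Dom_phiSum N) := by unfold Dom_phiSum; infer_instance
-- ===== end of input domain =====

-- B replaces A's divisor scan with per-divisor trial-division totients by Gauss's identity
-- (the totients of the divisors of N sum to N), returning N directly (0 for N ≤ 0).


-- ===== PORT A =====
-- inner 'while n % p == 0: n //= p' of euler_totient. Fuel only makes the loop total:
-- each pass divides n by p, so n.toNat passes (supplied at the call site) always suffice
-- on the states euler_totient reaches; fuel 0 is never hit there.
def etInner (fuel : Nat) (n p : Int) : Int :=
  match fuel with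
  | 0 => n
  | f + 1 =>
    if PySem.Int.mod n p = 0 then etInner f (PySem.Int.floordiv n p) p else n

-- outer 'while p * p <= n' loop of euler_totient, returning the final (n, result).
-- Fuel only makes the loop total: p grows by 1 each pass, so n.toNat passes suffice.
def etOuter (fuel : Nat) (n p result : Int) : Int × Int :=
  match fuel with
  | 0 => (n, result)
  | f + 1 =>
    if p * p ≤ n then
      if PySem.Int.mod n p = 0 then
        etOuter f (etInner n.toNat n p) (p + 1) (result - PySem.Int.floordiv result p)
      else etOuter f n (p + 1) result
    else (n, result)

def eulerTotient (n : Int) : Int :=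
  let r := etOuter n.toNat n 2 n
  if r.1 > 1 then r.2 - PySem.Int.floordiv r.2 r.1 else r.2

def phiSum (N : Int) : Int :=
  (PySem.List.pyRange 1 (N + 1) 1).foldl
    (fun acc i => if PySem.Int.mod N i = 0 then acc + eulerTotient i else acc) 0

-- ===== PORT B =====
def phiSum_alt (N : Int) : Int := if N > 0 then N else 0

-- ===== PRECONDITION & SPEC =====
def Spec_phiSum (N : Int) (out : Int) : Prop := out = phiSum_alt N
instance (N : Int) (out : Int) : Decidable (Spec_phiSum N out) := by unfold Spec_phiSum; infer_instance

-- ===== CLAIM (what is proved, stated in full; the proofs are below) =====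
def Claim_equal_phiSum : Prop := ∀ (N : Int), Dom_phiSum N → Spec_phiSum N (phiSum N)

-- ===== LEMMAS AND PROOFS =====

theorem pvEdivLt (n p : Int) (hn : 1 ≤ n) (hp : 2 ≤ p) : n / p < n := by
  rw [Int.ediv_lt_iff_lt_mul (by omega)]; nlinarith

-- etInner removes the factor p from n completely (given enough fuel)
theorem etInner_spec (fuel : Nat) (n p : Int) (hn : 1 ≤ n) (hp : 2 ≤ p)
    (hf : n.toNat ≤ fuel) :
    ∃ k : ℕ, n = p ^ k * etInner fuel n p ∧ ¬ ((p : Int) ∣ etInner fuel n p)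
      ∧ 1 ≤ etInner fuel n p := by
  induction fuel generalizing n with
  | zero => omega
  | succ f ih =>
    by_cases hm : PySem.Int.mod n p = 0
    · have hd : p ∣ n := (PySem.Int.mod_eq_zero_iff_dvd n p).1 hm
      have hfd : PySem.Int.floordiv n p = n / p := PySem.Int.floordiv_eq_ediv_of_pos (by omega)
      have hpn : p ≤ n := Int.le_of_dvd (by omega) hd
      have h1 : 1 ≤ n / p := by
        rw [Int.le_ediv_iff_mul_le (by omega)]; omega
      have hlt : n / p < n := pvEdivLt n p hn hp
      have he : etInner (f + 1) n p = etInner f (n / p) p := by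
        rw [etInner, if_pos hm, hfd]
      obtain ⟨k, hk1, hk2, hk3⟩ := ih (n / p) h1 (by omega)
      refine ⟨k + 1, ?_, by rw [he]; exact hk2, by rw [he]; exact hk3⟩
      rw [he]
      have hnp : n = p * (n / p) := by
        have hcancel := Int.ediv_mul_cancel hd
        linarith [hcancel]
      calc n = p * (n / p) := hnp
        _ = p * (p ^ k * etInner f (n / p) p) := by rw [← hk1]
        _ = p ^ (k + 1) * etInner f (n / p) p := by ring
    · have he : etInner (f + 1) n p = n := by rw [etInner, if_neg hm]
      refine ⟨0, by simp [he], ?_, by rw [he]; exact hn⟩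
      rw [he]
      intro hd
      exact hm ((PySem.Int.mod_eq_zero_iff_dvd n p).2 hd)

-- loop invariant of etOuter: if no prime below p divides n, running the loop from
-- (n, p, c·n) and applying euler_totient's final step yields c·φ(n)
theorem etOuter_spec (fuel : Nat) (n p c : Int) (hn : 1 ≤ n) (hp : 2 ≤ p) (hc : 0 ≤ c)
    (hf : (n - p).toNat < fuel)
    (hq : ∀ q : ℕ, q.Prime → (q : Int) ∣ n → p ≤ (q : Int)) :
    (if (etOuter fuel n p (c * n)).1 > 1 then
        (etOuter fuel n p (c * n)).2
          - PySem.Int.floordiv (etOuter fuel n p (c * n)).2 (etOuter fuel n p (c * n)).1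
      else (etOuter fuel n p (c * n)).2) = c * (Nat.totient n.toNat : Int) := by
  induction fuel generalizing n p c with
  | zero => omega
  | succ f ih =>
    by_cases hg : p * p ≤ n
    · by_cases hm : PySem.Int.mod n p = 0
      · -- p divides n; p must be prime
        have hd : p ∣ n := (PySem.Int.mod_eq_zero_iff_dvd n p).1 hm
        have hpltn : p < n := by nlinarith
        have hpp : Nat.Prime p.toNat := by
          have hqp := Nat.minFac_prime (n := p.toNat) (by omega)
          have hqd : (p.toNat.minFac : Int) ∣ n := by
            refine dvd_trans ?_ hd
            have hdv := Nat.minFac_dvd p.toNat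
            have h := Int.natCast_dvd_natCast.2 hdv
            simpa [Int.toNat_of_nonneg (by omega : (0:ℤ) ≤ p)] using h
          have hge := hq _ hqp hqd
          have hle : ((p.toNat.minFac : ℕ) : Int) ≤ p := by
            have := Nat.minFac_le (n := p.toNat) (by omega)
            omega
          have heq : p.toNat.minFac = p.toNat := by omega
          rwa [heq] at hqp
        -- factor out p completely via the inner loop
        rw [etOuter, if_pos hg, if_pos hm]
        obtain ⟨k, hk1, hk2, hk3⟩ := etInner_spec n.toNat n p hn hp (le_refl _)
        set e := etInner n.toNat n p with he
        have hk0 : 1 ≤ k := by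
          rcases Nat.eq_zero_or_pos k with h | h
          · exfalso; apply hk2; rw [h, pow_zero, one_mul] at hk1; rw [← hk1]; exact hd
          · exact h
        obtain ⟨k', rfl⟩ : ∃ k', k = k' + 1 := ⟨k - 1, by omega⟩
        have hppos : (0:Int) < p := by omega
        have hpkpos : (0:Int) < p ^ k' := pow_pos hppos k'
        have hpk2 : (2:Int) ≤ p ^ (k' + 1) := by
          calc (2:Int) ≤ p := hp
            _ = p ^ 1 := (pow_one p).symm
            _ ≤ p ^ (k' + 1) := pow_le_pow_right₀ (by omega) (by omega)
        have hen : e < n := by nlinarith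
        have hfd : PySem.Int.floordiv (c * n) p = c * p ^ k' * e := by
          rw [PySem.Int.floordiv_eq_ediv_of_pos hppos]
          have hcn : c * n = c * p ^ k' * e * p := by rw [hk1]; ring
          rw [hcn, Int.mul_ediv_cancel _ (by omega : p ≠ 0)]
        have harg : c * n - PySem.Int.floordiv (c * n) p
            = (c * (p ^ (k' + 1) - p ^ k')) * e := by
          rw [hfd, hk1]; ring
        rw [harg]
        have hrec := ih e (p + 1) (c * (p ^ (k' + 1) - p ^ k')) hk3
          (by omega)
          (by
            have hle : p ^ k' ≤ p ^ (k' + 1) := by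
              calc p ^ k' = p ^ k' * 1 := by ring
                _ ≤ p ^ k' * p := by nlinarith
                _ = p ^ (k' + 1) := by ring
            exact mul_nonneg hc (by omega))
          (by omega)
          (by
            intro q hq1 hq2
            have hqn : (q : Int) ∣ n := by rw [hk1]; exact Dvd.dvd.mul_left hq2 _
            have h1 := hq q hq1 hqn
            have h2 : (q : Int) ≠ p := by
              intro heq
              exact hk2 (heq ▸ hq2)
            omega)
        rw [hrec]
        -- arithmetic: c·(p^(k'+1) − p^k')·φ(e) = c·φ(n)
        have hmn : n.toNat = p.toNat ^ (k' + 1) * e.toNat := by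
          have hcast : (n.toNat : Int) = ((p.toNat ^ (k' + 1) * e.toNat : ℕ) : Int) := by
            push_cast
            rw [Int.toNat_of_nonneg (by omega : (0:ℤ) ≤ n),
              Int.toNat_of_nonneg (by omega : (0:ℤ) ≤ p),
              Int.toNat_of_nonneg (by omega : (0:ℤ) ≤ e)]
            exact hk1
          exact_mod_cast hcast
        have hnd : ¬ p.toNat ∣ e.toNat := by
          intro h
          apply hk2
          have hh := Int.natCast_dvd_natCast.2 h
          simpa [Int.toNat_of_nonneg (by omega : (0:ℤ) ≤ p),
            Int.toNat_of_nonneg (by omega : (0:ℤ) ≤ e)] using hh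
        have hcop : Nat.Coprime (p.toNat ^ (k' + 1)) e.toNat :=
          Nat.Coprime.pow_left _ ((Nat.Prime.coprime_iff_not_dvd hpp).2 hnd)
        rw [hmn, Nat.totient_mul hcop, Nat.totient_prime_pow hpp (by omega : 0 < k' + 1)]
        push_cast
        rw [show ((p.toNat - 1 : ℕ) : Int) = p - 1 from by omega,
          show ((p.toNat : ℕ) : Int) = p from by omega]
        ring
      · -- p does not divide n: step p → p+1
        have hpltn : p < n := by nlinarith
        rw [etOuter, if_pos hg, if_neg hm]
        refine ih n (p + 1) c hn (by omega) hc (by omega) ?_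
        intro q hq1 hq2
        have h1 := hq q hq1 hq2
        have h2 : (q : Int) ≠ p := by
          intro he
          exact hm ((PySem.Int.mod_eq_zero_iff_dvd n p).2 (he ▸ hq2))
        omega
    · -- loop exits: n is 1 or prime
      rw [etOuter, if_neg hg]
      simp only
      rcases eq_or_lt_of_le hn with h1 | h1
      · simp [← h1, Nat.totient_one]
      · have hprime : Nat.Prime n.toNat := by
          by_contra hnp
          have ha := Nat.minFac_sq_le_self (n := n.toNat) (by omega) hnp
          have hb := Nat.minFac_prime (n := n.toNat) (by omega)
          have hcd : (n.toNat.minFac : Int) ∣ n := by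
            have hdv := Nat.minFac_dvd n.toNat
            have h := Int.natCast_dvd_natCast.2 hdv
            simpa [Int.toNat_of_nonneg (by omega : (0:ℤ) ≤ n)] using h
          have hge := hq _ hb hcd
          have hsq : ((n.toNat.minFac : ℕ) : Int) * (n.toNat.minFac : Int) ≤ n := by
            have hhh : (n.toNat.minFac) * (n.toNat.minFac) ≤ n.toNat := by
              simpa [pow_two] using ha
            omega
          nlinarith
        rw [if_pos (by omega : (n:Int) > 1)]
        rw [PySem.Int.floordiv_eq_ediv_of_pos (by omega)]
        rw [Int.mul_ediv_cancel c (by omega : n ≠ 0)]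
        rw [Nat.totient_prime hprime]
        have hfin : ((n.toNat - 1 : ℕ) : Int) = n - 1 := by omega
        rw [hfin]; ring

theorem eulerTotient_eq (n : Int) (hn : 1 ≤ n) :
    eulerTotient n = (Nat.totient n.toNat : Int) := by
  have h := etOuter_spec n.toNat n 2 1 hn (by omega) (by omega) (by omega)
    (fun q hq _ => by exact_mod_cast hq.two_le)
  rw [one_mul] at h
  simpa [eulerTotient] using h

-- the conditional-accumulation loop of phiSum is a sum over the range
theorem foldl_ite_add (cnd : Int → Prop) [DecidablePred cnd] (f : Int → Int)
    (l : List Int) (a : Int) :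
    l.foldl (fun acc i => if cnd i then acc + f i else acc) a
      = a + (l.map (fun i => if cnd i then f i else 0)).sum := by
  induction l generalizing a with
  | nil => simp
  | cons x t ih => by_cases h : cnd x <;> simp [h, ih, add_assoc]

theorem sum_map_cast (g : ℕ → ℕ) (l : List ℕ) :
    (l.map (fun k => ((g k : ℕ) : Int))).sum = (((l.map g).sum : ℕ) : Int) := by
  induction l with
  | nil => simp
  | cons x t ih => simp [ih]

theorem list_range_sum (f : ℕ → ℕ) (n : ℕ) :
    ((List.range n).map f).sum = ∑ k ∈ Finset.range n, f k := by
  induction n with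
  | zero => simp
  | succ m ih => rw [List.range_succ, Finset.sum_range_succ]; simp [ih]

-- Gauss: the totients of the divisors of n sum to n, indexed as k+1 over range n
theorem range_sum_totient (n : ℕ) (hn : 1 ≤ n) :
    ((List.range n).map (fun k => if (k + 1) ∣ n then Nat.totient (k + 1) else 0)).sum = n := by
  rw [list_range_sum]
  have h0 := Nat.sum_totient' n
  rw [Finset.sum_filter] at h0
  rw [Finset.sum_range_succ' (fun m => if m ∣ n then Nat.totient m else 0) n] at h0
  have hz : (if 0 ∣ n then Nat.totient 0 else 0) = 0 := by
    rw [if_neg]; simpa using (by omega : n ≠ 0)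
  rw [hz, add_zero] at h0
  exact h0

theorem phiSum_eq_alt (N : Int) : phiSum N = phiSum_alt N := by
  by_cases hN : 1 ≤ N
  · have hrange : PySem.List.pyRange 1 (N + 1) 1
        = (List.range N.toNat).map (fun k : ℕ => (1 : Int) + k) := by
      rw [PySem.List.pyRange_one, show (N + 1 - 1 : Int) = N from by ring]
    unfold phiSum
    rw [foldl_ite_add (fun i => PySem.Int.mod N i = 0) eulerTotient, zero_add, hrange,
      List.map_map]
    have hfun : ((fun i => if PySem.Int.mod N i = 0 then eulerTotient i else 0)
          ∘ fun k : ℕ => (1 : Int) + k)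
        = fun k : ℕ => (((if (k + 1) ∣ N.toNat then Nat.totient (k + 1) else 0 : ℕ)) : Int) := by
      funext k
      simp only [Function.comp]
      have hiff : PySem.Int.mod N (1 + (k : Int)) = 0 ↔ (k + 1) ∣ N.toNat := by
        rw [PySem.Int.mod_eq_zero_iff_dvd]
        constructor
        · intro h
          have h2 : ((k + 1 : ℕ) : Int) ∣ ((N.toNat : ℕ) : Int) := by
            rw [Int.toNat_of_nonneg (by omega : (0:ℤ) ≤ N)]
            convert h using 2
            push_cast; ring
          exact_mod_cast h2
        · intro h
          have h2 : ((k + 1 : ℕ) : Int) ∣ ((N.toNat : ℕ) : Int) := Int.natCast_dvd_natCast.2 h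
          rw [Int.toNat_of_nonneg (by omega : (0:ℤ) ≤ N)] at h2
          convert h2 using 2
          push_cast; ring
      by_cases hdv : (k + 1) ∣ N.toNat
      · rw [if_pos (hiff.2 hdv), if_pos hdv, eulerTotient_eq _ (by omega)]
        congr 2
        omega
      · rw [if_neg (fun h => hdv (hiff.1 h)), if_neg hdv]
        simp
    rw [hfun, sum_map_cast, range_sum_totient N.toNat (by omega)]
    unfold phiSum_alt
    rw [if_pos (by omega : N > 0)]
    omega
  · have hnil : PySem.List.pyRange 1 (N + 1) 1 = [] :=
      PySem.List.pyRange_one_eq_nil (by omega)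
    unfold phiSum phiSum_alt
    rw [hnil, if_neg (by omega : ¬ N > 0)]
    simp

-- ===== VERDICT (by name: the statement is the Claim_ definition above) =====
theorem phiSum_spec : Claim_equal_phiSum := by
  intro N _
  unfold Spec_phiSum
  exact phiSum_eq_alt N
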